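-- pv_equiv track=rewrite | github.com/wcrainshaw-eng/permitgrab | discover_counties.py | find_date_field
-- ===== SOURCE A (Python) =====
-- def find_date_field(columns):
--     """Find the date field in columns."""
--     columns_lower = {c.lower(): c for c in columns}
--
--     date_indicators = ['issued', 'date', 'filed', 'created', 'submitted', 'applied']
--     for indicator in date_indicators:
--         for col_lower, col_actual in columns_lower.items():
--             if indicator in col_lower:
--                 return col_actual
--
--     return None
-- ===== SOURCE B (Python) =====
-- def _indicator_rank(col_lower, indicators):
--     for i, ind in enumerate(indicators):
--         if ind in col_lower:
--             return i
--     return None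
--
-- def find_date_field(columns):
--     """Find the date field in columns."""
--     columns_lower = {c.lower(): c for c in columns}
--     date_indicators = ['issued', 'date', 'filed', 'created', 'submitted', 'applied']
--     best = None
--     best_rank = len(date_indicators)
--     for col_lower, col_actual in columns_lower.items():
--         rank = _indicator_rank(col_lower, date_indicators)
--         if rank is not None and rank < best_rank:
--             best_rank = rank
--             best = col_actual
--     return best
-- ===== Notes on version B (the rewrite author's own statement) =====
-- stated objective: alternative
-- what changed: Instead of A's indicator-major nested scan (for each indicator, rescan all columns), B makes a single pass over the dict items, computes each column's minimum matching indicator index, and keeps the first column with a strictly smaller index.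
import Mathlib
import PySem

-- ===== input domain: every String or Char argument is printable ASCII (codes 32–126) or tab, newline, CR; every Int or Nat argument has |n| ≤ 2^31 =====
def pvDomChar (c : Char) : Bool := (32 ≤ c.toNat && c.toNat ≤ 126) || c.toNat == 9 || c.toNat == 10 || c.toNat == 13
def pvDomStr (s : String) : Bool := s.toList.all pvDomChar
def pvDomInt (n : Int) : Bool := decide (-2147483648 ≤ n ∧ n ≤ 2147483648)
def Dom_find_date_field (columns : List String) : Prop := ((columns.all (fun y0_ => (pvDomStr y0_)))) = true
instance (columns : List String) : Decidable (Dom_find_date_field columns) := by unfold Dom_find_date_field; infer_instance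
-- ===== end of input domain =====

-- B makes one pass over the dict items tracking the best (minimum) indicator rank, instead of A's indicator-major rescan; alternative decomposition, same cost.


def pvIndicators : List String := ["issued", "date", "filed", "created", "submitted", "applied"]

-- ===== PORT A =====
-- inner loop: for col_lower, col_actual in columns_lower.items(): if indicator in col_lower: return col_actual
def pvInnerA (ind : String) : List (String × String) → Option String
  | [] => none
  | (k, v) :: rest => if PySem.Str.isIn ind k then some v else pvInnerA ind rest

-- outer loop over date_indicators
def pvOuterA (items : List (String × String)) : List String → Option String
  | [] => none
  | ind :: rest =>
    match pvInnerA ind items with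
    | some v => some v
    | none => pvOuterA items rest

def find_date_field (columns : List String) : Option String :=
  let columns_lower :=
    columns.foldl (fun d c => d.insert (PySem.Str.lower c) c) (PySem.Dict.empty : PySem.Dict String String)
  pvOuterA columns_lower.items pvIndicators

-- ===== PORT B =====
-- _indicator_rank: first index i with indicators[i] in col_lower, else None
def pvRank (key : String) : List String → Option Nat
  | [] => none
  | ind :: rest => if PySem.Str.isIn ind key then some 0 else (pvRank key rest).map (· + 1)

-- one step of B's single pass: update (best, best_rank) on a strictly smaller rank
def pvStepB (st : Option String × Nat) (p : String × String) : Option String × Nat :=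
  match pvRank p.1 pvIndicators with
  | some i => if i < st.2 then (some p.2, i) else st
  | none => st

def find_date_field_alt (columns : List String) : Option String :=
  let columns_lower :=
    columns.foldl (fun d c => d.insert (PySem.Str.lower c) c) (PySem.Dict.empty : PySem.Dict String String)
  (columns_lower.items.foldl pvStepB (none, pvIndicators.length)).1

-- ===== PRECONDITION & SPEC =====
def Spec_find_date_field (columns : List String) (out : Option String) : Prop := out = find_date_field_alt columns
instance (columns : List String) (out : Option String) : Decidable (Spec_find_date_field columns out) := by unfold Spec_find_date_field; infer_instance

-- ===== CLAIM (what is proved, stated in full; the proofs are below) =====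
def Claim_equal_find_date_field : Prop := ∀ (columns : List String), Dom_find_date_field columns → Spec_find_date_field columns (find_date_field columns)

-- ===== LEMMAS AND PROOFS =====

lemma pvOuterA_nil (l : List String) : pvOuterA [] l = none := by
  induction l with
  | nil => rfl
  | cons ind rest ih => simp [pvOuterA, pvInnerA, ih]

lemma pvOuterA_cons_ind (items : List (String × String)) (ind : String) (rest : List String) :
    pvOuterA items (ind :: rest) = (pvInnerA ind items).or (pvOuterA items rest) := by
  cases h : pvInnerA ind items <;> simp [pvOuterA, h]

lemma pvOuterA_append (items : List (String × String)) (l1 l2 : List String) :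
    pvOuterA items (l1 ++ l2) = (pvOuterA items l1).or (pvOuterA items l2) := by
  induction l1 with
  | nil => simp [pvOuterA]
  | cons ind t ih =>
      rw [List.cons_append, pvOuterA_cons_ind, pvOuterA_cons_ind, ih, Option.or_assoc]

lemma pvOuterA_cons_noMatch (p : String × String) (rest : List (String × String))
    (l : List String) (h : ∀ ind ∈ l, PySem.Str.isIn ind p.1 = false) :
    pvOuterA (p :: rest) l = pvOuterA rest l := by
  induction l with
  | nil => rfl
  | cons ind t ih =>
      obtain ⟨k, v⟩ := p
      rw [pvOuterA_cons_ind, pvOuterA_cons_ind, ih (fun i hi => h i (List.mem_cons_of_mem _ hi))]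
      have hk : PySem.Chars.isIn ind.toList k.toList = false := by
        simpa [PySem.Str.isIn_eq] using h ind (List.mem_cons_self ..)
      simp [pvInnerA, hk]

lemma pvRank_none (key : String) (l : List String) (h : pvRank key l = none) :
    ∀ ind ∈ l, PySem.Str.isIn ind key = false := by
  induction l with
  | nil => simp
  | cons ind t ih =>
      simp only [pvRank] at h
      by_cases hk : PySem.Chars.isIn ind.toList key.toList = true
      · simp [hk] at h
      · simp [hk] at h
        intro j hj
        rcases List.mem_cons.mp hj with rfl | hm
        · simpa [PySem.Str.isIn_eq] using hk
        · exact ih h j hm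

lemma pvRank_some (key : String) (l : List String) (i : Nat) (h : pvRank key l = some i) :
    (∃ ind rest', l.drop i = ind :: rest' ∧ PySem.Str.isIn ind key = true) ∧
    (∀ j ∈ l.take i, PySem.Str.isIn j key = false) := by
  induction l generalizing i with
  | nil => simp [pvRank] at h
  | cons ind t ih =>
      simp only [pvRank] at h
      by_cases hk : PySem.Chars.isIn ind.toList key.toList = true
      · simp [hk] at h
        subst h
        exact ⟨⟨ind, t, rfl, by simpa [PySem.Str.isIn_eq] using hk⟩, by simp⟩
      · simp [hk] at h
        obtain ⟨i', hr, rfl⟩ := h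
        obtain ⟨⟨a, b, hd, hm⟩, hno⟩ := ih i' hr
        refine ⟨⟨a, b, ?_, hm⟩, ?_⟩
        · simpa using hd
        · intro j hj
          rcases List.mem_cons.mp (by simpa [List.take_succ_cons] using hj) with rfl | hm'
          · simpa using hk
          · exact hno j hm'

lemma pvFold_eq (items : List (String × String)) :
    ∀ (b : Option String) (r : Nat), r ≤ pvIndicators.length →
      (items.foldl pvStepB (b, r)).1 = (pvOuterA items (pvIndicators.take r)).or b := by
  induction items with
  | nil => intro b r _; simp [pvOuterA_nil]
  | cons p rest ih =>
      intro b r hr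
      rw [List.foldl_cons]
      cases h : pvRank p.1 pvIndicators with
      | none =>
          have hstep : pvStepB (b, r) p = (b, r) := by simp [pvStepB, h]
          rw [hstep, ih b r hr, pvOuterA_cons_noMatch]
          intro ind hi
          exact pvRank_none _ _ h ind (List.take_subset _ _ hi)
      | some i =>
          obtain ⟨⟨ind, rest', hdrop, hmatch⟩, hno⟩ := pvRank_some _ _ _ h
          by_cases hi : i < r
          · have hstep : pvStepB (b, r) p = (some p.2, i) := by simp [pvStepB, h, hi]
            rw [hstep, ih (some p.2) i (le_of_lt (lt_of_lt_of_le hi hr))]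
            have htake : pvIndicators.take r
                = pvIndicators.take i ++ ind :: rest'.take (r - i - 1) := by
              have h1 : r = i + (r - i) := by omega
              rw [h1, List.take_add, hdrop]
              have h2 : r - i = (r - i - 1) + 1 := by omega
              rw [h2, List.take_succ_cons]
              have h3 : i + (r - i - 1 + 1) - i - 1 = r - i - 1 := by omega
              rw [h3]
            rw [htake, pvOuterA_append, pvOuterA_cons_ind]
            have hinner : pvInnerA ind (p :: rest) = some p.2 := by
              obtain ⟨k, v⟩ := p
              have hm' : PySem.Chars.isIn ind.toList k.toList = true := by
                simpa [PySem.Str.isIn_eq] using hmatch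
              simp [pvInnerA, hm']
            rw [hinner, pvOuterA_cons_noMatch p rest _ hno]
            cases pvOuterA rest (pvIndicators.take i) <;> simp
          · have hstep : pvStepB (b, r) p = (b, r) := by simp [pvStepB, h, hi]
            rw [hstep, ih b r hr, pvOuterA_cons_noMatch]
            intro j hj
            refine hno j ?_
            have : pvIndicators.take r = (pvIndicators.take i).take r := by
              rw [List.take_take]; congr 1; omega
            rw [this] at hj
            exact List.take_subset _ _ hj

-- ===== VERDICT (by name: the statement is the Claim_ definition above) =====
theorem find_date_field_spec : Claim_equal_find_date_field := by
  intro columns _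
  unfold Spec_find_date_field find_date_field find_date_field_alt
  rw [pvFold_eq _ none pvIndicators.length le_rfl, List.take_length, Option.or_none]
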